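-- pv_equiv track=rewrite | github.com/Len-Yoon/baekjoon-python | 프로그래머스/0/181884. n보다 커질 때까지 더하기/n보다 커질 때까지 더하기.py | solution
-- ===== SOURCE A (Python) =====
-- def solution(numbers, n):
--     answer = 0
--     for i in numbers:
--         if n >= answer:
--             answer += i
--         else:
--             break
--     return answer
-- ===== SOURCE B (Python) =====
-- def solution(numbers, n):
--     # Build the full table of prefix sums (with a leading 0), then search it:
--     # return the first prefix sum strictly greater than n, else the total.
--     sums = [0]
--     t = 0
--     for x in numbers:
--         t += x
--         sums.append(t)
--     return next((s for s in sums if s > n), sums[-1])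
-- ===== Notes on version B (the rewrite author's own statement) =====
-- stated objective: alternative
-- what changed: Replaces A's fused accumulate-and-test loop with an early break by a two-phase scheme: build the complete prefix-sum table (with leading 0) in one pass, then a separate linear search for the first entry strictly greater than n, falling back to the total.
import Mathlib
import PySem

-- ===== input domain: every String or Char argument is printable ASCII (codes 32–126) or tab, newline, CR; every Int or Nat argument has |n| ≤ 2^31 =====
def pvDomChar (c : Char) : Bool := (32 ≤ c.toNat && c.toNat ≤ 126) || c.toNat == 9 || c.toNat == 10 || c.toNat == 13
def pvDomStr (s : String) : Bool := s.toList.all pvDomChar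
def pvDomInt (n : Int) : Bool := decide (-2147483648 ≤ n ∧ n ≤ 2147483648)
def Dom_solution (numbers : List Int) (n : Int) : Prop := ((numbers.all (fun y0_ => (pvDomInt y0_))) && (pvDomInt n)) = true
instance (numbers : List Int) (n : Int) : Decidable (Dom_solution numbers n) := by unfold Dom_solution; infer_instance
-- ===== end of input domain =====

-- B replaces A's fused accumulate-and-test early-exit loop by a prefix-sum table plus a separate first-exceeds search (alternative decomposition, same cost).


-- ===== PORT A =====
-- answer starts at 0; while n >= answer, add the next element; else break.
def solutionGo (n : Int) : List Int → Int → Int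
  | [], answer => answer
  | i :: rest, answer => if n ≥ answer then solutionGo n rest (answer + i) else answer

def solution (numbers : List Int) (n : Int) : Int := solutionGo n numbers 0

-- ===== PORT B =====
-- build prefix-sum table (running total t), then first entry > n, else last entry.
def sumsGo (t : Int) : List Int → List Int
  | [] => []
  | x :: rest => (t + x) :: sumsGo (t + x) rest

def solution_alt (numbers : List Int) (n : Int) : Int :=
  let sums : List Int := 0 :: sumsGo 0 numbers
  match sums.find? (fun s => decide (s > n)) with
  | some s => s
  | none => sums.getLastD 0

-- ===== PRECONDITION & SPEC =====
def Spec_solution (numbers : List Int) (n : Int) (out : Int) : Prop := out = solution_alt numbers n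
instance (numbers : List Int) (n : Int) (out : Int) : Decidable (Spec_solution numbers n out) := by unfold Spec_solution; infer_instance

-- ===== CLAIM (what is proved, stated in full; the proofs are below) =====
def Claim_equal_solution : Prop := ∀ (numbers : List Int) (n : Int), Dom_solution numbers n → Spec_solution numbers n (solution numbers n)

-- ===== LEMMAS AND PROOFS =====
theorem go_eq (n : Int) (numbers : List Int) (t : Int) :
    solutionGo n numbers t =
      (match (t :: sumsGo t numbers).find? (fun s => decide (s > n)) with
       | some s => s
       | none => (t :: sumsGo t numbers).getLastD 0) := by
  induction numbers generalizing t with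
  | nil =>
    simp [solutionGo, sumsGo, List.find?]
    by_cases h : t > n
    · simp [h]
    · simp [h]
  | cons x rest ih =>
    simp only [solutionGo, sumsGo]
    by_cases h : n ≥ t
    · have hnot : ¬ t > n := by omega
      rw [ih (t + x)]
      simp [List.find?, hnot]
    · have hgt : t > n := by omega
      simp [h, List.find?, hgt]

-- ===== VERDICT (by name: the statement is the Claim_ definition above) =====
theorem solution_spec : Claim_equal_solution := by
  intro numbers n _
  unfold Spec_solution solution solution_alt
  exact go_eq n numbers 0
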